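-- pv_equiv track=rewrite | github.com/NguyenDinhHiep-b19dccn235/python-code-ptit | PY01062-ƯU THẾ NGUYÊN TỐ.py | cso
-- ===== SOURCE A (Python) =====
-- def cso(n):
--     n=int(n)
--     a=0
--     while n>0:
--         a+=1
--         n//=10
--     x=1
--     b=0
--     while x<a:
--         x+=1
--         if a%x==0:
--             b+=1
--         else:
--             b+=0
--     if b==1:return 1
--     else:return 0
-- ===== SOURCE B (Python) =====
-- def cso(n):
--     n = int(n)
--     a = 0
--     while n > 0:
--         a += 1
--         n //= 10
--     if a < 2:
--         return 0
--     i = 2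
--     while i * i <= a:
--         if a % i == 0:
--             return 0
--         i += 1
--     return 1
-- ===== Notes on version B (the rewrite author's own statement) =====
-- stated objective: simpler
-- what changed: A tallies every divisor of the digit count over the whole range and then tests the tally; B instead runs an early-exit trial-division primality test on the digit count up to its square root, exiting on the first divisor found and handling small digit counts up front.
import Mathlib
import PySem

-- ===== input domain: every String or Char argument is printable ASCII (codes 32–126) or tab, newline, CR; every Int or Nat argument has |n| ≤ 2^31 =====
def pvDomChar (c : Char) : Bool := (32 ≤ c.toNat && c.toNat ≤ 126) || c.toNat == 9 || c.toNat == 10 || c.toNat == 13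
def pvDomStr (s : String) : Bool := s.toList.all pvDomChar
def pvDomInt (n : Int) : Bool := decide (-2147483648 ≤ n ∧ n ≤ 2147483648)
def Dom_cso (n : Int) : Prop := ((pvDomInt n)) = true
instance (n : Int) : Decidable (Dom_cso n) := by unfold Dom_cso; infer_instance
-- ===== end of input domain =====

-- B replaces A's full divisor count of the digit count by an early-exit trial-division
-- primality test up to sqrt(a); objective: simpler.

-- ===== PORT A =====
-- while n>0: a+=1; n//=10
def csoDigits (n a : Int) : Int :=
  if h : n > 0 then csoDigits (PySem.Int.floordiv n 10) (a + 1) else a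
termination_by n.toNat
decreasing_by
  have : PySem.Int.floordiv n 10 = n / 10 := PySem.Int.floordiv_eq_ediv_of_pos (by omega)
  rw [this]; omega

-- while x<a: x+=1; if a%x==0: b+=1 else: b+=0
def csoCount (a x b : Int) : Int :=
  if h : x < a then
    csoCount a (x + 1) (if PySem.Int.mod a (x + 1) = 0 then b + 1 else b + 0)
  else b
termination_by (a - x).toNat
decreasing_by omega

def cso (n : Int) : Int :=
  let a := csoDigits n 0
  let b := csoCount a 1 0
  if b = 1 then 1 else 0

-- ===== PORT B =====
def csoAltDigits (n a : Int) : Int :=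
  if h : n > 0 then csoAltDigits (PySem.Int.floordiv n 10) (a + 1) else a
termination_by n.toNat
decreasing_by
  have : PySem.Int.floordiv n 10 = n / 10 := PySem.Int.floordiv_eq_ediv_of_pos (by omega)
  rw [this]; omega

-- while i*i<=a: if a%i==0: return 0; i+=1
def csoAltTrial (a i : Int) : Int :=
  if h : i * i ≤ a then
    if PySem.Int.mod a i = 0 then 0 else csoAltTrial a (i + 1)
  else 1
termination_by (a + 1 - i).toNat
decreasing_by
  have hi : i ≤ a := by nlinarith [sq_nonneg i, sq_nonneg (i - 1)]
  omega

def cso_alt (n : Int) : Int :=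
  let a := csoAltDigits n 0
  if a < 2 then 0
  else csoAltTrial a 2

-- ===== PRECONDITION & SPEC =====
def Spec_cso (n : Int) (out : Int) : Prop := out = cso_alt n
instance (n : Int) (out : Int) : Decidable (Spec_cso n out) := by unfold Spec_cso; infer_instance

-- ===== CLAIM (what is proved, stated in full; the proofs are below) =====
def Claim_equal_cso : Prop := ∀ (n : Int), Dom_cso n → Spec_cso n (cso n)

-- ===== LEMMAS AND PROOFS =====

theorem digits_eq (n a : Int) : csoAltDigits n a = csoDigits n a := by
  induction n, a using csoDigits.induct with
  | case1 n a h ih =>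
    rw [csoDigits, csoAltDigits]; simp only [dif_pos h]; exact ih
  | case2 n a h => rw [csoDigits, csoAltDigits]; simp [h]

theorem digits_lower (n a : Int) : a ≤ csoDigits n a := by
  induction n, a using csoDigits.induct with
  | case1 n a h ih => rw [csoDigits]; simp only [h, dif_pos]; omega
  | case2 n a h => rw [csoDigits]; simp [h]

theorem digits_upper (k : Nat) (n a : Int) (hn : n < 10 ^ k) :
    csoDigits n a ≤ a + k := by
  induction k generalizing n a with
  | zero =>
    rw [csoDigits]
    have : ¬ n > 0 := by simp at hn; omega
    simp [this]
  | succ k ih =>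
    rw [csoDigits]
    split
    · rename_i h
      have hf : PySem.Int.floordiv n 10 = n / 10 := PySem.Int.floordiv_eq_ediv_of_pos (by omega)
      have h10 : (10:Int) ^ (k+1) = 10 * 10 ^ k := by ring
      have : n / 10 < 10 ^ k := by omega
      have := ih (n / 10) (a + 1) this
      rw [hf]; omega
    · omega

theorem csoCount_lt (a x b : Int) (h : x < a) :
    csoCount a x b =
      csoCount a (x + 1) (if PySem.Int.mod a (x + 1) = 0 then b + 1 else b + 0) := by
  rw [csoCount]; simp [h]

theorem csoCount_ge (a x b : Int) (h : ¬ x < a) : csoCount a x b = b := by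
  rw [csoCount]; simp [h]

theorem csoAltTrial_le (a i : Int) (h : i * i ≤ a) :
    csoAltTrial a i = if PySem.Int.mod a i = 0 then 0 else csoAltTrial a (i + 1) := by
  rw [csoAltTrial]; simp [h]

theorem csoAltTrial_gt (a i : Int) (h : ¬ i * i ≤ a) : csoAltTrial a i = 1 := by
  rw [csoAltTrial]; simp [h]

theorem key (a : Int) (h0 : 0 ≤ a) (h10 : a ≤ 10) :
    (if csoCount a 1 0 = 1 then (1:Int) else 0) =
      (if a < 2 then 0 else csoAltTrial a 2) := by
  interval_cases a <;> norm_num [csoCount_lt, csoCount_ge, csoAltTrial_le, csoAltTrial_gt, PySem.Int.mod] <;> decide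

-- ===== VERDICT (by name: the statement is the Claim_ definition above) =====
theorem cso_spec : Claim_equal_cso := by
  intro n hd
  unfold Spec_cso cso cso_alt
  rw [digits_eq]
  have h0 : (0:Int) ≤ csoDigits n 0 := digits_lower n 0
  have h10 : csoDigits n 0 ≤ 10 := by
    have hn : n < 10 ^ 10 := by
      unfold Dom_cso pvDomInt at hd
      simp at hd
      norm_num
      omega
    simpa using digits_upper 10 n 0 hn
  exact key _ h0 h10
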